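-- pv_equiv track=rewrite | github.com/raphaelDupuy/Server-Farm-Simulation | Main.py | calcule_delta
-- ===== SOURCE A (Python) =====
-- def calcule_delta(data):
--     delta = dict()
--     for temps, id, event in data:
--         if not event:
--             delta[id] = - temps
--         else:
--             delta[id] += temps
--
--     delta = {id: dt for id, dt in delta.items() if dt >= 0}
--     return delta
-- ===== SOURCE B (Python) =====
-- def calcule_delta(data):
--     # Group-then-reduce: collect each id's (temps, event) stream once, then fold
--     # each stream with the reset/accumulate rule, then keep non-negative totals.
--     groups = {}
--     for temps, id, event in data:
--         groups.setdefault(id, []).append((temps, event))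
--     delta = {}
--     for id, evs in groups.items():
--         acc = None
--         for temps, event in evs:
--             acc = -temps if not event else acc + temps
--         delta[id] = acc
--     return {id: dt for id, dt in delta.items() if dt >= 0}
-- ===== Notes on version B (the rewrite author's own statement) =====
-- stated objective: alternative
-- what changed: Replaces the interleaved single-pass dict update with a group-then-reduce pipeline: one pass groups each id's (temps, event) pairs into per-id lists, a second phase folds each list with the reset/accumulate rule, then the >= 0 filter is applied.
import Mathlib
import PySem

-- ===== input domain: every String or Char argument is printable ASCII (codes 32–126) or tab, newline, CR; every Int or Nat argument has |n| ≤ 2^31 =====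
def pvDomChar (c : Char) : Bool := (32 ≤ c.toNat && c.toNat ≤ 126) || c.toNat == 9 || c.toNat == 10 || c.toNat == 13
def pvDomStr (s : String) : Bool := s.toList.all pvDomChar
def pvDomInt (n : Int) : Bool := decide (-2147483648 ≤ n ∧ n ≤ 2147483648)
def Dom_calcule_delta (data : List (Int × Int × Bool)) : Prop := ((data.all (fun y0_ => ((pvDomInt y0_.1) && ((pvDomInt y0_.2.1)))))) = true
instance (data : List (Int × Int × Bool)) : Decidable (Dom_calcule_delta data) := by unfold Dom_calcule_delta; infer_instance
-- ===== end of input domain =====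

-- B re-implements A as group-then-reduce (same cost, different decomposition); return values agree on Pre_.

-- ===== PORT A =====
-- loop body: `if not event: delta[id] = -temps else: delta[id] += temps`.
-- The `+=` branch raises KeyError when id is absent; Pre_ excludes those inputs,
-- so the `getD id 0` default below is never consulted inside Pre_.
def pvFA (d : PySem.Dict Int Int) (x : Int × Int × Bool) : PySem.Dict Int Int :=
  if !x.2.2 then d.insert x.2.1 (-x.1) else d.insert x.2.1 (d.getD x.2.1 0 + x.1)

def calcule_delta (data : List (Int × Int × Bool)) : List (Int × Int) :=
  -- delta = loop; then {id: dt for id, dt in delta.items() if dt >= 0}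
  (data.foldl pvFA PySem.Dict.empty).items.filter (fun p => decide (0 ≤ p.2))

-- ===== PORT B =====
-- inner fold of Source B: `acc = -temps if not event else acc + temps`, acc starts as None.
-- `None + temps` raises in Python (outside Pre_); here the None case propagates as `none`.
def pvRed (evs : List (Int × Bool)) : Option Int :=
  evs.foldl (fun acc te => if !te.2 then some (-te.1) else acc.map (· + te.1)) none

-- `groups.setdefault(id, []).append((temps, event))`
def pvFG (g : PySem.Dict Int (List (Int × Bool))) (x : Int × Int × Bool) :
    PySem.Dict Int (List (Int × Bool)) :=
  g.modify x.2.1 [] (· ++ [(x.1, x.2.2)])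

-- `delta[id] = acc` for each group (acc is an int whenever Pre_ holds; `.getD 0` is never consulted then)
def pvDeltaOf (groups : PySem.Dict Int (List (Int × Bool))) : PySem.Dict Int Int :=
  groups.items.foldl (fun d p => d.insert p.1 ((pvRed p.2).getD 0)) PySem.Dict.empty

def calcule_delta_alt (data : List (Int × Int × Bool)) : List (Int × Int) :=
  (pvDeltaOf (data.foldl pvFG PySem.Dict.empty)).items.filter (fun p => decide (0 ≤ p.2))

-- ===== PRECONDITION & SPEC =====
-- Pre_ excludes exactly the inputs where the first event of some id is truthy:
-- there A's `delta[id] += temps` raises KeyError (and Source B raises TypeError on None + temps).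
def Pre_calcule_delta (data : List (Int × Int × Bool)) : Prop :=
  ∀ i : Fin data.length, (data.get i).2.2 = true →
    (data.get i).2.1 ∈ (data.take i.val).map (fun y => y.2.1)
instance (data : List (Int × Int × Bool)) : Decidable (Pre_calcule_delta data) := by
  unfold Pre_calcule_delta; infer_instance

def pvWitness_calcule_delta : (List (Int × Int × Bool)) :=
  [(3, 1, false), (5, 1, true), (2, 2, false)]

def Spec_calcule_delta (data : List (Int × Int × Bool)) (out : List (Int × Int)) : Prop := out = calcule_delta_alt data
instance (data : List (Int × Int × Bool)) (out : List (Int × Int)) : Decidable (Spec_calcule_delta data out) := by unfold Spec_calcule_delta; infer_instance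

-- ===== CLAIM (what is proved, stated in full; the proofs are below) =====
def Claim_equal_calcule_delta : Prop := ∀ (data : List (Int × Int × Bool)), Dom_calcule_delta data → Pre_calcule_delta data → Spec_calcule_delta data (calcule_delta data)

-- ===== LEMMAS AND PROOFS =====

def pvF (p : Int × List (Int × Bool)) : Int × Int := (p.1, (pvRed p.2).getD 0)

theorem pvRed_append_false (l : List (Int × Bool)) (t : Int) :
    pvRed (l ++ [(t, false)]) = some (-t) := by
  simp [pvRed, List.foldl_append]

theorem pvRed_append_true (l : List (Int × Bool)) (t : Int) :
    pvRed (l ++ [(t, true)]) = (pvRed l).map (· + t) := by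
  simp [pvRed, List.foldl_append]

theorem pre_append (p : List (Int × Int × Bool)) (x : Int × Int × Bool)
    (h : Pre_calcule_delta (p ++ [x])) :
    Pre_calcule_delta p ∧ (x.2.2 = true → x.2.1 ∈ p.map (fun y => y.2.1)) := by
  constructor
  · intro i hi
    have hlt : i.val < (p ++ [x]).length := by
      have := i.isLt
      simp only [List.length_append, List.length_cons, List.length_nil]
      omega
    have := h ⟨i.val, hlt⟩
    simp only [List.get_eq_getElem] at this ⊢
    rw [List.getElem_append_left i.isLt, List.take_append_of_le_length (le_of_lt i.isLt)] at this
    exact this hi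
  · intro he
    have hlt : p.length < (p ++ [x]).length := by simp
    have := h ⟨p.length, hlt⟩
    simp only [List.get_eq_getElem, List.getElem_concat_length] at this
    rw [List.take_left] at this
    exact this he

theorem keys_G (p : List (Int × Int × Bool)) :
    (p.foldl pvFG PySem.Dict.empty).keys = PySem.Set.ofList (p.map (fun y => y.2.1)) := by
  have := PySem.Dict.keys_foldl_modify_key (l := p) (key := fun y => y.2.1)
    (d0 := ([] : List (Int × Bool))) (f := fun _ x => (· ++ [(x.1, x.2.2)]))
    (d := PySem.Dict.empty)
  simpa [pvFG, PySem.Dict.keys_empty, PySem.Set.update_nil_left] using this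

theorem nodup_keys_G (p : List (Int × Int × Bool)) :
    (p.foldl pvFG PySem.Dict.empty).keys.Nodup := by
  rw [keys_G]; exact PySem.Set.nodup_ofList _

theorem main_inv (data : List (Int × Int × Bool)) (h : Pre_calcule_delta data) :
    (data.foldl pvFA PySem.Dict.empty).items
      = (data.foldl pvFG PySem.Dict.empty).items.map pvF
    ∧ ∀ q ∈ (data.foldl pvFG PySem.Dict.empty).items, (pvRed q.2).isSome := by
  induction data using List.reverseRecOn with
  | nil =>
    refine ⟨rfl, ?_⟩
    intro q hq
    simp [PySem.Dict.empty] at hq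
  | append_singleton p x ih =>
    obtain ⟨hp, hx⟩ := pre_append p x (by exact h)
    obtain ⟨hitems, hsome⟩ := ih hp
    set G := p.foldl pvFG PySem.Dict.empty with hG
    set A := p.foldl pvFA PySem.Dict.empty with hA
    have hAkeys : A.keys = G.keys := by
      simp only [PySem.Dict.keys, hitems, List.map_map]
      rfl
    have hGnd : G.keys.Nodup := nodup_keys_G p
    have hAnd : A.keys.Nodup := by rw [hAkeys]; exact hGnd
    have hcont : A.contains x.2.1 = G.contains x.2.1 := by
      rw [PySem.Dict.contains_eq_decide_mem_keys, PySem.Dict.contains_eq_decide_mem_keys, hAkeys]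
    have hmod : pvFG G x = G.insert x.2.1 (G.getD x.2.1 [] ++ [(x.1, x.2.2)]) := rfl
    simp only [List.foldl_append, List.foldl_cons, List.foldl_nil]
    rw [← hG, ← hA]
    by_cases hc : G.contains x.2.1 = true
    · -- id already seen: overwrite in place on both sides
      obtain ⟨v, hv⟩ : ∃ v, G.get? x.2.1 = some v := by
        have := PySem.Dict.contains_eq_isSome_get? (d := G) (k := x.2.1)
        rw [hc] at this
        exact Option.isSome_iff_exists.mp this.symm
      have hmem : (x.2.1, v) ∈ G.items := PySem.Dict.mem_items_of_get?_eq_some G hv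
      have hGd : G.getD x.2.1 [] = v := PySem.Dict.getD_of_get?_eq_some G [] hv
      obtain ⟨w, hw⟩ := Option.isSome_iff_exists.mp (hsome _ hmem)
      have hAget : A.getD x.2.1 0 = w := by
        have hmw : (x.2.1, w) ∈ A.items := by
          rw [hitems]
          exact List.mem_map.mpr ⟨(x.2.1, v), hmem, by simp [pvF, hw]⟩
        exact PySem.Dict.getD_of_mem_items A hmw hAnd 0
      have hAc : A.contains x.2.1 = true := by rw [hcont]; exact hc
      have hAval : pvFA A x = A.insert x.2.1 (if !x.2.2 then -x.1 else w + x.1) := by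
        cases hxe : x.2.2 <;> simp [pvFA, hxe, hAget]
      constructor
      · rw [hAval, hmod, hGd,
          PySem.Dict.items_insert_of_contains A _ hAc, PySem.Dict.items_insert_of_contains G _ hc,
          hitems, List.map_map, List.map_map]
        refine List.map_congr_left ?_
        intro q hq
        by_cases hq1 : q.1 = x.2.1
        · have hq2 : q.2 = v := by
            have : G.get? q.1 = some q.2 :=
              (PySem.Dict.get?_eq_some_iff_mem_items G q.1 q.2 hGnd).mpr (by exact hq)
            rw [hq1, hv] at this
            exact Option.some_injective _ this.symm
          cases hxe : x.2.2 <;>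
            simp [Function.comp, pvF, hq1, hq2, pvRed_append_false, pvRed_append_true, hw]
        · simp [Function.comp, pvF, hq1]
      · intro q hq
        rw [hmod, hGd] at hq
        rcases (PySem.Dict.mem_items_insert _ _ _ _).mp hq with hqe | ⟨hqm, _⟩
        · subst hqe
          cases hxe : x.2.2 <;>
            simp [pvRed_append_false, pvRed_append_true, hw]
        · exact hsome _ hqm
    · -- fresh id: the event must be falsy (Pre_), both sides append
      have hcf : G.contains x.2.1 = false := by
        cases hcc : G.contains x.2.1
        · rfl
        · exact absurd hcc hc
      have he : x.2.2 = false := by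
        cases hxe : x.2.2
        · rfl
        · exfalso
          have hmem : x.2.1 ∈ G.keys := by
            rw [keys_G]
            exact (PySem.Set.mem_ofList _ _).mpr (hx hxe)
          rw [← PySem.Dict.contains_iff_mem_keys G] at hmem
          rw [hmem] at hcf
          exact Bool.true_eq_false.mp hcf
      have hAc : A.contains x.2.1 = false := by rw [hcont]; exact hcf
      have hGd : G.getD x.2.1 [] = [] := PySem.Dict.getD_of_not_contains G [] hcf
      have hAval : pvFA A x = A.insert x.2.1 (-x.1) := by simp [pvFA, he]
      constructor
      · rw [hAval, hmod, hGd,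
          PySem.Dict.items_insert_of_not_contains A _ hAc, PySem.Dict.items_insert_of_not_contains G _ hcf,
          hitems, List.map_append]
        simp [pvF, pvRed, he]
      · intro q hq
        rw [hmod, hGd] at hq
        rcases (PySem.Dict.mem_items_insert _ _ _ _).mp hq with hqe | ⟨hqm, _⟩
        · subst hqe
          simp [he, pvRed]
        · exact hsome _ hqm

theorem delta_items (groups : PySem.Dict Int (List (Int × Bool)))
    (hnd : groups.keys.Nodup) :
    (pvDeltaOf groups).items = groups.items.map pvF := by
  have h := PySem.Dict.items_foldl_insert_fresh
    (l := groups.items)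
    (k := fun p => p.1) (v := fun p => (pvRed p.2).getD 0) (d := PySem.Dict.empty)
    (by intro a _; exact PySem.Dict.contains_empty _)
    (by simpa [PySem.Dict.keys] using hnd)
  simpa [pvDeltaOf, pvF] using h

-- ===== VERDICT (by name: the statement is the Claim_ definition above) =====
theorem calcule_delta_spec : Claim_equal_calcule_delta := by
  intro data _ hpre
  unfold Spec_calcule_delta calcule_delta calcule_delta_alt
  rw [delta_items _ (nodup_keys_G data), (main_inv data hpre).1]
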